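-- pv_equiv track=rewrite | github.com/Afterglow375/daily-programmer-solutions | python/daily120.py | machineOneBreakDown
-- ===== SOURCE A (Python) =====
-- def machineOne(coin): # takes N (a coin)
--     half = coin//2
--     third = coin//3
--     quarter = coin//4
--     return (half, third, quarter)
--
-- def machineOneBreakDown(coin): # takes a coin and breaks it into a corresponding number of 1 value coins using machine 1
--     coinTuple = machineOne(coin)
--     sum = 0
--
--     if 0 < coinTuple[0] < 3:
--         sum += 1
--     elif coinTuple[0] == 0:
--         pass
--     else:
--         sum += machineOneBreakDown(coinTuple[0])
--
--     if 0 < coinTuple[1] < 3: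
--         sum += 1
--     elif coinTuple[1] == 0:
--         pass
--     else:
--         sum += machineOneBreakDown(coinTuple[1])
--
--     if 0 < coinTuple[2] < 3:
--         sum += 1
--     elif coinTuple[2] == 0:
--         pass
--     else:
--         sum += machineOneBreakDown(coinTuple[2])
--
--     return sum
-- ===== SOURCE B (Python) =====
-- def machineOneBreakDown(coin):
--     # Memoized: each distinct sub-coin value is broken down once (dict cache).
--     cache = {}
--     def go(n):
--         if n in cache:
--             return cache[n]
--         total = 0
--         for d in (2, 3, 4):
--             p = n // d
--             if p >= 3:
--                 total += go(p)
--             elif p > 0: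
--                 total += 1
--         cache[n] = total
--         return total
--     return go(coin)
-- ===== Notes on version B (the rewrite author's own statement) =====
-- stated objective: faster
-- what changed: B memoizes the break-down recursion with a dict cache keyed by coin value (an inner go() helper), so each distinct sub-coin is solved once, instead of A's plain recursion that re-solves the same values exponentially often.
import Mathlib
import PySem

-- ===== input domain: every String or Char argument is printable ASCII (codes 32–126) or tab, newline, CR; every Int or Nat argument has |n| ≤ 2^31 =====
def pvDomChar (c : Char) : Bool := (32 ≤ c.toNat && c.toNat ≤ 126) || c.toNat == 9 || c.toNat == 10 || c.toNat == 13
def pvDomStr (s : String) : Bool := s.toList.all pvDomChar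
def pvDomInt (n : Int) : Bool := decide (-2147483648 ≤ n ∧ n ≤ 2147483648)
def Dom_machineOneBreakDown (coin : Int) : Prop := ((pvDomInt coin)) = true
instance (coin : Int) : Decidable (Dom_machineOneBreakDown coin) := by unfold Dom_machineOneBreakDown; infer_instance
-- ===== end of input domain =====

-- B memoizes the recursion with a dict cache, so each distinct sub-coin value is
-- broken down once where A's plain recursion re-solves it repeatedly (objective: faster).

-- ===== PORT A =====
-- machineOne: returns (coin//2, coin//3, coin//4)
def machineOne (coin : Int) : Int × Int × Int :=
  (PySem.Int.floordiv coin 2, PySem.Int.floordiv coin 3, PySem.Int.floordiv coin 4)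

-- A's unbounded recursion made total with a fuel guard; fuel coin.toNat + 1 always
-- suffices on Pre_ (each recursive argument is strictly smaller), so the port is exact there.
def goA : Nat → Int → Int
  | 0, _ => 0
  | f + 1, coin =>
    let t := machineOne coin
    let sum : Int := 0
    let sum := if 0 < t.1 ∧ t.1 < 3 then sum + 1 else if t.1 = 0 then sum else sum + goA f t.1
    let sum := if 0 < t.2.1 ∧ t.2.1 < 3 then sum + 1 else if t.2.1 = 0 then sum else sum + goA f t.2.1
    let sum := if 0 < t.2.2 ∧ t.2.2 < 3 then sum + 1 else if t.2.2 = 0 then sum else sum + goA f t.2.2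
    sum

def machineOneBreakDown (coin : Int) : Int := goA (coin.toNat + 1) coin

-- ===== PORT B =====
-- body of B's `for d in (2, 3, 4)` loop; `rec` is the recursive call to `go`
def stepB (rec : Int → PySem.Dict Int Int → Int × PySem.Dict Int Int) (n : Int)
    (st : Int × PySem.Dict Int Int) (d : Int) : Int × PySem.Dict Int Int :=
  let p := PySem.Int.floordiv n d
  if 3 ≤ p then
    let r := rec p st.2
    (st.1 + r.1, r.2)
  else if 0 < p then (st.1 + 1, st.2)
  else st

-- B's inner `go`, the cache threaded through; same fuel guard as A's port for totality.
def goB : Nat → Int → PySem.Dict Int Int → Int × PySem.Dict Int Int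
  | 0, _, c => (0, c)
  | f + 1, n, c =>
    match c.get? n with
    | some v => (v, c)
    | none =>
      let res := [(2 : Int), 3, 4].foldl (stepB (goB f) n) (0, c)
      (res.1, res.2.insert n res.1)

def machineOneBreakDown_alt (coin : Int) : Int :=
  (goB (coin.toNat + 1) coin PySem.Dict.empty).1

-- ===== PRECONDITION & SPEC =====
-- Pre_ excludes negative coins, on which the Python A recurses forever and raises RecursionError.
def Pre_machineOneBreakDown (coin : Int) : Prop := 0 ≤ coin
instance (coin : Int) : Decidable (Pre_machineOneBreakDown coin) := by unfold Pre_machineOneBreakDown; infer_instance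
def pvWitness_machineOneBreakDown : Int := 12

def Spec_machineOneBreakDown (coin : Int) (out : Int) : Prop := out = machineOneBreakDown_alt coin
instance (coin : Int) (out : Int) : Decidable (Spec_machineOneBreakDown coin out) := by unfold Spec_machineOneBreakDown; infer_instance

-- ===== CLAIM (what is proved, stated in full; the proofs are below) =====
def Claim_equal_machineOneBreakDown : Prop := ∀ (coin : Int), Dom_machineOneBreakDown coin → Pre_machineOneBreakDown coin → Spec_machineOneBreakDown coin (machineOneBreakDown coin)

-- ===== LEMMAS AND PROOFS =====

lemma part_nonneg {n d : Int} (hn : 0 ≤ n) (hd : 0 < d) : 0 ≤ PySem.Int.floordiv n d := by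
  rw [PySem.Int.floordiv_eq_ediv_of_pos hd]; exact Int.ediv_nonneg hn (le_of_lt hd)

lemma part_lt {n d : Int} (hd : 2 ≤ d) (h3 : 3 ≤ PySem.Int.floordiv n d) :
    (PySem.Int.floordiv n d).toNat < n.toNat := by
  have hd0 : (0 : Int) < d := by omega
  rw [PySem.Int.floordiv_eq_ediv_of_pos hd0] at h3 ⊢
  have he := Int.mul_ediv_add_emod n d
  have hr := Int.emod_nonneg n (by omega : d ≠ 0)
  have hmul : 2 * (n / d) ≤ d * (n / d) := by nlinarith
  omega

-- one conditional summand of A's body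
def partStep (f : Nat) (p s : Int) : Int :=
  if 0 < p ∧ p < 3 then s + 1 else if p = 0 then s else s + goA f p

-- the contribution of one part
def cA (f : Nat) (p : Int) : Int :=
  if 0 < p ∧ p < 3 then 1 else if p = 0 then 0 else goA f p

lemma partStep_eq (f : Nat) (p s : Int) : partStep f p s = s + cA f p := by
  unfold partStep cA; split_ifs <;> omega
  
lemma goA_succ (f : Nat) (n : Int) :
    goA (f + 1) n =
      partStep f (PySem.Int.floordiv n 4)
        (partStep f (PySem.Int.floordiv n 3) (partStep f (PySem.Int.floordiv n 2) 0)) := rfl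

lemma partStep_congr {f g : Nat} {p s : Int} (hp : 0 ≤ p) (h : 3 ≤ p → goA f p = goA g p) :
    partStep f p s = partStep g p s := by
  unfold partStep
  split_ifs with h1 h2
  · rfl
  · rfl
  · rw [h (by omega)]

-- fuel irrelevance for goA: any fuel above n.toNat gives the same value
lemma goA_fuel : ∀ (m : Nat) (n : Int), n.toNat ≤ m → 0 ≤ n →
    ∀ f g : Nat, n.toNat < f → n.toNat < g → goA f n = goA g n := by
  intro m
  induction m with
  | zero =>
    intro n hm hn f g hf hg
    obtain ⟨f', rfl⟩ : ∃ f', f = f' + 1 := ⟨f - 1, by omega⟩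
    obtain ⟨g', rfl⟩ : ∃ g', g = g' + 1 := ⟨g - 1, by omega⟩
    rw [goA_succ, goA_succ]
    have h : ∀ d : Int, 2 ≤ d → 3 ≤ PySem.Int.floordiv n d → goA f' (PySem.Int.floordiv n d) = goA g' (PySem.Int.floordiv n d) := by
      intro d hd h3; exact absurd (part_lt hd h3) (by omega)
    rw [partStep_congr (part_nonneg hn (by omega)) (h 2 (by omega)),
        partStep_congr (part_nonneg hn (by omega)) (h 3 (by omega)),
        partStep_congr (part_nonneg hn (by omega)) (h 4 (by omega))]
  | succ m ih =>
    intro n hm hn f g hf hg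
    obtain ⟨f', rfl⟩ : ∃ f', f = f' + 1 := ⟨f - 1, by omega⟩
    obtain ⟨g', rfl⟩ : ∃ g', g = g' + 1 := ⟨g - 1, by omega⟩
    rw [goA_succ, goA_succ]
    have h : ∀ d : Int, 2 ≤ d → 3 ≤ PySem.Int.floordiv n d → goA f' (PySem.Int.floordiv n d) = goA g' (PySem.Int.floordiv n d) := by
      intro d hd h3
      have hlt := part_lt hd h3
      exact ih _ (by omega) (part_nonneg hn (by omega)) f' g' (by omega) (by omega)
    rw [partStep_congr (part_nonneg hn (by omega)) (h 2 (by omega)),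
        partStep_congr (part_nonneg hn (by omega)) (h 3 (by omega)),
        partStep_congr (part_nonneg hn (by omega)) (h 4 (by omega))]

-- cache invariant: every cached value is A's value for its key
def invC (c : PySem.Dict Int Int) : Prop :=
  ∀ k v, c.get? k = some v → 0 ≤ k ∧ v = goA (k.toNat + 1) k

lemma stepB_spec {f : Nat} {n d : Int} {st : Int × PySem.Dict Int Int}
    (ih : ∀ (p : Int) (c : PySem.Dict Int Int), 0 ≤ p → p.toNat < f → invC c →
      (goB f p c).1 = goA (p.toNat + 1) p ∧ invC (goB f p c).2)
    (hn : 0 ≤ n) (hnf : n.toNat ≤ f) (hd : 2 ≤ d) (hinv : invC st.2) :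
    (stepB (goB f) n st d).1 = st.1 + cA n.toNat (PySem.Int.floordiv n d) ∧
      invC (stepB (goB f) n st d).2 := by
  unfold stepB cA
  have hp := part_nonneg hn (by omega : (0:Int) < d)
  by_cases h3 : 3 ≤ PySem.Int.floordiv n d
  · have hlt := part_lt hd h3
    have hrec := ih (PySem.Int.floordiv n d) st.2 hp (by omega) hinv
    have hfuel : goA ((PySem.Int.floordiv n d).toNat + 1) (PySem.Int.floordiv n d)
        = goA n.toNat (PySem.Int.floordiv n d) :=
      goA_fuel _ _ (le_refl _) hp _ _ (by omega) (by omega)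
    simp only [if_pos h3, if_neg (by omega : ¬(0 < PySem.Int.floordiv n d ∧ PySem.Int.floordiv n d < 3)),
      if_neg (by omega : ¬PySem.Int.floordiv n d = 0)]
    exact ⟨by rw [hrec.1, hfuel], hrec.2⟩
  · simp only [if_neg h3]
    by_cases h0 : 0 < PySem.Int.floordiv n d
    · simp only [if_pos h0, if_pos (⟨h0, by omega⟩ : 0 < PySem.Int.floordiv n d ∧ PySem.Int.floordiv n d < 3)]
      exact ⟨by trivial, hinv⟩
    · simp only [if_neg h0, if_neg (by omega : ¬(0 < PySem.Int.floordiv n d ∧ PySem.Int.floordiv n d < 3)),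
        if_pos (by omega : PySem.Int.floordiv n d = 0)]
      exact ⟨by omega, hinv⟩

lemma goB_correct : ∀ (f : Nat) (n : Int) (c : PySem.Dict Int Int), 0 ≤ n → n.toNat < f → invC c →
    (goB f n c).1 = goA (n.toNat + 1) n ∧ invC (goB f n c).2 := by
  intro f
  induction f with
  | zero => intro n c _ hf _; omega
  | succ f ih =>
    intro n c hn hf hinv
    show (goB (f + 1) n c).1 = _ ∧ _
    rw [goB]
    cases hc : c.get? n with
    | some v =>
      have hv := hinv n v hc
      exact ⟨hv.2, hinv⟩
    | none =>
      simp only [List.foldl]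
      have s2 := stepB_spec (st := (0, c)) (d := 2) ih hn (by omega) (by omega) hinv
      have s3 := stepB_spec (st := stepB (goB f) n (0, c) 2) (d := 3) ih hn (by omega) (by omega) s2.2
      have s4 := stepB_spec (st := stepB (goB f) n (stepB (goB f) n (0, c) 2) 3) (d := 4)
        ih hn (by omega) (by omega) s3.2
      have hval : (stepB (goB f) n (stepB (goB f) n (stepB (goB f) n (0, c) 2) 3) 4).1
          = goA (n.toNat + 1) n := by
        rw [s4.1, s3.1, s2.1, goA_succ, partStep_eq, partStep_eq, partStep_eq]
      constructor
      · exact hval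
      · intro k v hk
        rw [PySem.Dict.get?_insert] at hk
        by_cases hkn : k = n
        · rw [if_pos hkn] at hk
          refine ⟨hkn ▸ hn, ?_⟩
          rw [hkn, ← hval]
          exact (Option.some.inj hk).symm
        · rw [if_neg hkn] at hk
          exact s4.2 k v hk

-- ===== VERDICT (by name: the statement is the Claim_ definition above) =====
theorem machineOneBreakDown_spec : Claim_equal_machineOneBreakDown := by
  intro coin _ hpre
  unfold Spec_machineOneBreakDown machineOneBreakDown machineOneBreakDown_alt
  have h := goB_correct (coin.toNat + 1) coin PySem.Dict.empty hpre (by omega)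
    (by intro k v hk; simp [PySem.Dict.get?_empty] at hk)
  exact h.1.symm
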